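-- pv_equiv track=rewrite | github.com/TYHgamer/HB-for-CBC | CBC_dh.py | createidxs
-- ===== SOURCE A (Python) =====
-- def createidxs(n=0,N=0,names=[]):
--     idxs = []
--     n=0;m=N
--     for i in range(0,len(names)):
--         idxs.append((n,m))
--         n = n+N
--         m = m+N
--     return idxs
-- ===== SOURCE B (Python) =====
-- def createidxs(n=0, N=0, names=[]):
--     # closed form: the i-th pair is (i*N, (i+1)*N); no running accumulators
--     return [(i * N, (i + 1) * N) for i in range(len(names))]
-- ===== Notes on version B (the rewrite author's own statement) =====
-- stated objective: simpler
-- what changed: Replaced the loop with two mutable running accumulators n,m by a direct closed-form comprehension computing the i-th pair as (i*N,(i+1)*N) from the index alone.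
import Mathlib
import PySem

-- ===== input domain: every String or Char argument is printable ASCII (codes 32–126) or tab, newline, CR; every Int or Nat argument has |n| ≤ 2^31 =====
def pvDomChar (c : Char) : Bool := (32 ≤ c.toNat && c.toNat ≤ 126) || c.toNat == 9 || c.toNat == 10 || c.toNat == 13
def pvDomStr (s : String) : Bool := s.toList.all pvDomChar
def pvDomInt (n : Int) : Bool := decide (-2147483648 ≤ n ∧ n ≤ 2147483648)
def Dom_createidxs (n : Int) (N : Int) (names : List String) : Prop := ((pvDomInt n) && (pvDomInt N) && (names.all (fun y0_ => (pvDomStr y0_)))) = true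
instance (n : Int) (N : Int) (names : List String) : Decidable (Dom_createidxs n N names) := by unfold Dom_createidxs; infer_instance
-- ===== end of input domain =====

-- B replaces A's accumulator loop by a closed-form per-index computation (simpler decomposition, same cost).

-- ===== PORT A =====
-- the loop body: append (n,m), then advance both accumulators by N
def createidxs (n : Int) (N : Int) (names : List String) : List (Int × Int) :=
  let idxs : List (Int × Int) := []
  let n := (0 : Int)
  let m := N
  let st := (PySem.List.pyRange 0 (names.length : Int) 1).foldl
    (fun (st : List (Int × Int) × Int × Int) (_i : Int) =>
      (st.1 ++ [(st.2.1, st.2.2)], st.2.1 + N, st.2.2 + N))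
    (idxs, n, m)
  st.1

-- ===== PORT B =====
def createidxs_alt (n : Int) (N : Int) (names : List String) : List (Int × Int) :=
  (List.range names.length).map (fun (i : Nat) => ((i : Int) * N, ((i : Int) + 1) * N))

-- ===== PRECONDITION & SPEC =====
def Spec_createidxs (n : Int) (N : Int) (names : List String) (out : List (Int × Int)) : Prop := out = createidxs_alt n N names
instance (n : Int) (N : Int) (names : List String) (out : List (Int × Int)) : Decidable (Spec_createidxs n N names out) := by unfold Spec_createidxs; infer_instance

-- ===== CLAIM (what is proved, stated in full; the proofs are below) =====
def Claim_equal_createidxs : Prop := ∀ (n : Int) (N : Int) (names : List String), Dom_createidxs n N names → Spec_createidxs n N names (createidxs n N names)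

-- ===== LEMMAS AND PROOFS =====

-- loop invariant: after consuming l elements starting from accumulators (n0, m0),
-- the collected list is acc followed by the arithmetic progression from (n0, m0)
theorem createidxs_loop (N : Int) (l : List Int) (acc : List (Int × Int)) (n0 m0 : Int) :
    (l.foldl
      (fun (st : List (Int × Int) × Int × Int) (_i : Int) =>
        (st.1 ++ [(st.2.1, st.2.2)], st.2.1 + N, st.2.2 + N))
      (acc, n0, m0)).1
    = acc ++ (List.range l.length).map (fun (i : Nat) => (n0 + (i : Int) * N, m0 + (i : Int) * N)) := by
  induction l generalizing acc n0 m0 with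
  | nil => simp
  | cons x xs ih =>
    rw [List.foldl_cons, ih, List.length_cons, List.range_succ_eq_map,
      List.map_cons, List.map_map]
    simp only [List.append_assoc, List.singleton_append, Nat.cast_zero,
      zero_mul, add_zero, Function.comp_def]
    have h : (fun i : Nat => (n0 + N + (i : Int) * N, m0 + N + (i : Int) * N))
        = (fun i : Nat => (n0 + ((i.succ : Nat) : Int) * N, m0 + ((i.succ : Nat) : Int) * N)) := by
      funext i
      simp only [Prod.mk.injEq]
      refine ⟨by push_cast; ring, by push_cast; ring⟩
    rw [h]

-- ===== VERDICT (by name: the statement is the Claim_ definition above) =====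
theorem createidxs_spec : Claim_equal_createidxs := by
  intro n N names _
  show createidxs n N names = createidxs_alt n N names
  unfold createidxs createidxs_alt
  simp only [createidxs_loop, List.nil_append]
  rw [PySem.List.length_pyRange_one]
  simp only [sub_zero, Int.toNat_natCast]
  have h : (fun i : Nat => ((0 : Int) + (i : Int) * N, N + (i : Int) * N))
      = (fun i : Nat => ((i : Int) * N, ((i : Int) + 1) * N)) := by
    funext i
    simp only [Prod.mk.injEq]
    refine ⟨by ring, by ring⟩
  rw [h]
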